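-- pv_equiv track=rewrite | github.com/saparia-data/data_structure | pepcoding/dynamic_programming/9_coin_change_permutation.py | coinChangePermutation
-- ===== SOURCE A (Python) =====
-- def coinChangePermutation(coins, n, target_amt):
--
--     dp = [0] * (target_amt + 1)
--
--     dp[0] = 1 # to pay 0 amount there is one way to pay that is to pay nothing
--
--     for amt in range(1, len(dp)):
--
--         for coin in coins:
--
--             if(coin <= amt):
--                 ramt = amt - coin # ramt -> remaining amount
--                 dp[amt] += dp[ramt]
--
--     return dp[target_amt]
-- ===== SOURCE B (Python) =====
-- def coinChangePermutation(coins, n, target_amt):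
--     memo = {}
--
--     def solve(t):
--         if t == 0:
--             return 1
--         if t in memo:
--             return memo[t]
--         total = 0
--         for c in coins:
--             if c <= t:
--                 total += solve(t - c)
--         memo[t] = total
--         return total
--
--     return solve(target_amt)
-- ===== Notes on version B (the rewrite author's own statement) =====
-- stated objective: alternative
-- what changed: Replaced the bottom-up DP array filled for every amount 1..target by a top-down memoized recursion solve(t) over the remaining amount with a dict memo table.
-- outside the precondition, e.g. on coinChangePermutation([1, 0], 0, 1): A returns 2, B raises RecursionError
import Mathlib
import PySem

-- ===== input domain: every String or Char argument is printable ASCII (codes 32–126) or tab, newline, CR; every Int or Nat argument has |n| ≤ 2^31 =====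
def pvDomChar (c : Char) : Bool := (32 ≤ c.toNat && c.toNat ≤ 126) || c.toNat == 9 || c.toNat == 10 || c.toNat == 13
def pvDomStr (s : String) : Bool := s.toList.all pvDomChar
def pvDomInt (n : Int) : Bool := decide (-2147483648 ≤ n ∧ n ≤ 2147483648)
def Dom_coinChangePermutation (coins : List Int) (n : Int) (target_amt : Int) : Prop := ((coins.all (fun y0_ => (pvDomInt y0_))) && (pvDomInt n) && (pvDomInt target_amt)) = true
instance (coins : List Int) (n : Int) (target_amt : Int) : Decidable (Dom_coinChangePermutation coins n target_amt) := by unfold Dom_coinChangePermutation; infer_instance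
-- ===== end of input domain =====

-- B replaces A's bottom-up DP array over all amounts 1..target by a top-down memoized
-- recursion on the remaining amount (objective: alternative decomposition, same cost).

-- ===== PORT A =====
-- dp[i] read: in Python an out-of-range read raises IndexError; inside Pre_ every read
-- is in range, so the `.getD 0` default is never the result of an out-of-range read there.
def pvGetA (dp : List Int) (i : Int) : Int := (PySem.List.pyGet? dp i).getD 0

def coinChangePermutation (coins : List Int) (n : Int) (target_amt : Int) : Int :=
  let dp0 : List Int := List.replicate (target_amt + 1).toNat 0
  let dp1 := dp0.set 0 1
  let dp2 := (PySem.List.pyRange 1 (dp1.length : Int)).foldl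
    (fun dp amt =>
      coins.foldl (fun dp coin =>
        if coin ≤ amt then
          dp.set amt.toNat (pvGetA dp amt + pvGetA dp (amt - coin))
        else dp) dp) dp1
  pvGetA dp2 target_amt

-- ===== PORT B =====
-- fuel = target_amt.toNat + 1 is a totality guard only: inside Pre_ every coin is ≥ 1,
-- so the remaining amount drops by at least 1 per call and the fuel is never exhausted.
def pvSolveB (coins : List Int) : Nat → Int → PySem.Dict Int Int → Int × PySem.Dict Int Int
  | 0, _, memo => (0, memo)
  | fuel+1, t, memo =>
    if t = 0 then (1, memo)
    else
      match memo.get? t with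
      | some v => (v, memo)
      | none =>
        let p := coins.foldl
          (fun (p : Int × PySem.Dict Int Int) c =>
            if c ≤ t then
              let r := pvSolveB coins fuel (t - c) p.2
              (p.1 + r.1, r.2)
            else p) (0, memo)
        (p.1, p.2.insert t p.1)

def coinChangePermutation_alt (coins : List Int) (n : Int) (target_amt : Int) : Int :=
  (pvSolveB coins (target_amt.toNat + 1) target_amt PySem.Dict.empty).1

-- ===== PRECONDITION & SPEC =====
-- Pre_ excludes (a) negative target_amt, where A raises IndexError (dp is empty), and
-- (b) positive target_amt with a coin ≤ 0: a negative coin makes A raise IndexError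
-- (dp[amt-coin] past the end), and a zero coin makes A return an accidental doubling of
-- the partial sum while B's natural recursion does not terminate (RecursionError).
def Pre_coinChangePermutation (coins : List Int) (n : Int) (target_amt : Int) : Prop :=
  0 ≤ target_amt ∧ (target_amt = 0 ∨ ∀ c ∈ coins, 1 ≤ c)
instance (coins : List Int) (n : Int) (target_amt : Int) : Decidable (Pre_coinChangePermutation coins n target_amt) := by unfold Pre_coinChangePermutation; infer_instance

def pvWitness_coinChangePermutation : List Int × Int × Int := ([1, 2], 0, 4)

def Spec_coinChangePermutation (coins : List Int) (n : Int) (target_amt : Int) (out : Int) : Prop := out = coinChangePermutation_alt coins n target_amt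
instance (coins : List Int) (n : Int) (target_amt : Int) (out : Int) : Decidable (Spec_coinChangePermutation coins n target_amt out) := by unfold Spec_coinChangePermutation; infer_instance

-- ===== CLAIM (what is proved, stated in full; the proofs are below) =====
def Claim_equal_coinChangePermutation : Prop := ∀ (coins : List Int) (n : Int) (target_amt : Int), Dom_coinChangePermutation coins n target_amt → Pre_coinChangePermutation coins n target_amt → Spec_coinChangePermutation coins n target_amt (coinChangePermutation coins n target_amt)

-- ===== LEMMAS AND PROOFS =====

-- the common mathematical value: number of ordered ways to write t from coins (fuelled)
def pvWf (coins : List Int) : Nat → Nat → Int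
  | 0, _ => 0
  | f+1, t =>
    if t = 0 then 1
    else coins.foldl
      (fun acc c => acc + (if 1 ≤ c ∧ c ≤ (t : Int) then pvWf coins f (t - c.toNat) else 0)) 0

def pvW (coins : List Int) (t : Nat) : Int := pvWf coins (t + 1) t

theorem pvWf_succ_def (coins : List Int) (f t : Nat) :
    pvWf coins (f + 1) t =
      if t = 0 then 1
      else coins.foldl
        (fun acc c => acc + (if 1 ≤ c ∧ c ≤ (t : Int) then pvWf coins f (t - c.toNat) else 0)) 0 := rfl

theorem pvWf_stable (coins : List Int) :
    ∀ (f g t : Nat), t < f → t < g → pvWf coins f t = pvWf coins g t := by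
  intro f
  induction f with
  | zero => intro g t hf _; exact absurd hf (by omega)
  | succ f ih =>
    intro g t hf hg
    cases g with
    | zero => exact absurd hg (by omega)
    | succ g' =>
      rw [pvWf_succ_def, pvWf_succ_def]
      by_cases ht : t = 0
      · simp [ht]
      · rw [if_neg ht, if_neg ht]
        apply PySem.List.foldl_congr_mem
        intro acc c _
        by_cases hcond : 1 ≤ c ∧ c ≤ (t : Int)
        · rw [if_pos hcond, if_pos hcond, ih g' (t - c.toNat) (by omega) (by omega)]
        · rw [if_neg hcond, if_neg hcond]

theorem pvW_zero (coins : List Int) : pvW coins 0 = 1 := rfl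

theorem pvW_succ (coins : List Int) (t : Nat) (ht : t ≠ 0) :
    pvW coins t =
      (coins.map (fun c => if 1 ≤ c ∧ c ≤ (t : Int) then pvW coins (t - c.toNat) else 0)).sum := by
  unfold pvW
  rw [pvWf_succ_def, if_neg ht, PySem.List.foldl_add, zero_add]
  apply congrArg List.sum
  apply List.map_congr_left
  intro c _
  by_cases hcond : 1 ≤ c ∧ c ≤ (t : Int)
  · rw [if_pos hcond, if_pos hcond]
    exact pvWf_stable coins t (t - c.toNat + 1) (t - c.toNat) (by omega) (by omega)
  · rw [if_neg hcond, if_neg hcond]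

theorem pvGetA_eq (dp : List Int) (i : Int) (h0 : 0 ≤ i) :
    pvGetA dp i = dp.getD i.toNat 0 := by
  simp only [pvGetA, PySem.List.pyGet?, PySem.List.pyIdx?, if_pos h0,
    List.getD_eq_getElem?_getD]
  split
  · simp
  · have hnone : dp[i.toNat]? = none := by
      rw [List.getElem?_eq_none_iff]; omega
    rw [hnone]; simp

theorem innerA (coins : List Int) (N k : Nat) (hk1 : 1 ≤ k) (hkN : k < N) :
    ∀ (cs : List Int), (∀ c ∈ cs, 1 ≤ c) →
    ∀ (dp : List Int) (acc : Int), dp.length = N →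
      (∀ i, i < N → i ≠ k → dp.getD i 0 = if i < k then pvW coins i else 0) →
      dp.getD k 0 = acc →
      (cs.foldl (fun dp coin =>
          if coin ≤ (k : Int) then
            dp.set (k : Int).toNat (pvGetA dp (k : Int) + pvGetA dp ((k : Int) - coin))
          else dp) dp).length = N ∧
      (∀ i, i < N → i ≠ k →
        (cs.foldl (fun dp coin =>
          if coin ≤ (k : Int) then
            dp.set (k : Int).toNat (pvGetA dp (k : Int) + pvGetA dp ((k : Int) - coin))
          else dp) dp).getD i 0 = if i < k then pvW coins i else 0) ∧
      (cs.foldl (fun dp coin =>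
          if coin ≤ (k : Int) then
            dp.set (k : Int).toNat (pvGetA dp (k : Int) + pvGetA dp ((k : Int) - coin))
          else dp) dp).getD k 0 =
        acc + (cs.map (fun c => if 1 ≤ c ∧ c ≤ (k : Int) then pvW coins (k - c.toNat) else 0)).sum := by
  intro cs
  induction cs with
  | nil =>
    intro _ dp acc hlen hdp hacc
    simpa using ⟨hlen, hdp, hacc⟩
  | cons c cs ihc =>
    intro hcs dp acc hlen hdp hacc
    have hc1 : (1 : Int) ≤ c := hcs c (by simp)
    simp only [List.foldl_cons]
    by_cases hct : c ≤ (k : Int)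
    · rw [if_pos hct]
      have hkk : ((k : Int)).toNat = k := by omega
      have hrk : ((k : Int) - c).toNat = k - c.toNat := by omega
      have hget_k : pvGetA dp (k : Int) = acc := by
        rw [pvGetA_eq dp _ (by omega), hkk, hacc]
      have hget_r : pvGetA dp ((k : Int) - c) = pvW coins (k - c.toNat) := by
        rw [pvGetA_eq dp _ (by omega), hrk, hdp (k - c.toNat) (by omega) (by omega),
          if_pos (by omega)]
      set dp2 := dp.set ((k : Int)).toNat (pvGetA dp (k : Int) + pvGetA dp ((k : Int) - c)) with hdp2
      have hlen2 : dp2.length = N := by simp [hdp2, hlen]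
      have hdp2v : ∀ i, i < N → i ≠ k → dp2.getD i 0 = if i < k then pvW coins i else 0 := by
        intro i hi hik
        rw [hdp2, List.getD_eq_getElem?_getD, List.getElem?_set, hkk, if_neg (by omega),
          ← List.getD_eq_getElem?_getD]
        exact hdp i hi hik
      have hacc2 : dp2.getD k 0 = acc + pvW coins (k - c.toNat) := by
        rw [hdp2, List.getD_eq_getElem?_getD, List.getElem?_set, hkk, if_pos rfl,
          if_pos (by omega)]
        simp [hget_k, hget_r]
      obtain ⟨h1, h2, h3⟩ := ihc (fun x hx => hcs x (by simp [hx])) dp2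
        (acc + pvW coins (k - c.toNat)) hlen2 hdp2v hacc2
      refine ⟨h1, h2, ?_⟩
      rw [h3, List.map_cons, List.sum_cons, if_pos ⟨hc1, hct⟩]
      ring
    · rw [if_neg hct]
      obtain ⟨h1, h2, h3⟩ := ihc (fun x hx => hcs x (by simp [hx])) dp acc hlen hdp hacc
      refine ⟨h1, h2, ?_⟩
      rw [h3, List.map_cons, List.sum_cons, if_neg (by tauto)]
      ring

theorem outerA (coins : List Int) (hc : ∀ c ∈ coins, 1 ≤ c) (N : Nat)
    (dp1 : List Int) (hlen : dp1.length = N)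
    (hdp1 : ∀ i, i < N → dp1.getD i 0 = if i = 0 then 1 else 0) :
    ∀ (k : Nat), 1 ≤ k → k ≤ N →
      ((PySem.List.pyRange 1 (k : Int)).foldl
        (fun dp amt =>
          coins.foldl (fun dp coin =>
            if coin ≤ amt then
              dp.set amt.toNat (pvGetA dp amt + pvGetA dp (amt - coin))
            else dp) dp) dp1).length = N ∧
      (∀ i, i < N →
        ((PySem.List.pyRange 1 (k : Int)).foldl
          (fun dp amt =>
            coins.foldl (fun dp coin =>
              if coin ≤ amt then
                dp.set amt.toNat (pvGetA dp amt + pvGetA dp (amt - coin))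
              else dp) dp) dp1).getD i 0 = if i < k then pvW coins i else 0) := by
  intro k hk1
  induction k, hk1 using Nat.le_induction with
  | base =>
    intro _
    have hr : PySem.List.pyRange 1 ((1 : Nat) : Int) = [] := by decide
    rw [hr]
    simp only [List.foldl_nil]
    refine ⟨hlen, ?_⟩
    intro i hi
    rw [hdp1 i hi]
    by_cases hi0 : i = 0
    · simp [hi0, pvW_zero]
    · rw [if_neg hi0, if_neg (by omega)]
  | succ k hk1 ih =>
    intro hkN
    obtain ⟨hL, hV⟩ := ih (by omega)
    have hcast : ((k + 1 : Nat) : Int) = (k : Int) + 1 := by push_cast; ring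
    rw [hcast, PySem.List.pyRange_one_succ_right (by omega : (1 : Int) ≤ (k : Int)),
      List.foldl_append, List.foldl_cons, List.foldl_nil]
    have hacc : ((PySem.List.pyRange 1 (k : Int)).foldl
        (fun dp amt =>
          coins.foldl (fun dp coin =>
            if coin ≤ amt then
              dp.set amt.toNat (pvGetA dp amt + pvGetA dp (amt - coin))
            else dp) dp) dp1).getD k 0 = 0 := by
      rw [hV k (by omega), if_neg (by omega)]
    obtain ⟨h1, h2, h3⟩ := innerA coins N k hk1 (by omega) coins hc _ 0 hL
      (fun i hi hik => hV i hi) hacc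
    refine ⟨h1, ?_⟩
    intro i hi
    by_cases hik : i = k
    · subst hik
      rw [h3, zero_add, if_pos (by omega), pvW_succ coins i (by omega)]
    · rw [h2 i hi hik]
      by_cases hlt : i < k
      · rw [if_pos hlt, if_pos (by omega)]
      · rw [if_neg hlt, if_neg (by omega)]

theorem A_eval (coins : List Int) (n T : Int) (hT : 0 ≤ T) (hc : ∀ c ∈ coins, 1 ≤ c) :
    coinChangePermutation coins n T = pvW coins T.toNat := by
  simp only [coinChangePermutation]
  rw [List.length_set, List.length_replicate]
  have hN : (T + 1).toNat = T.toNat + 1 := by omega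
  have hcastN : (((T + 1).toNat : Nat) : Int) = ((T.toNat + 1 : Nat) : Int) := by rw [hN]
  rw [hcastN]
  have hlen : ((List.replicate (T + 1).toNat (0 : Int)).set 0 1).length = T.toNat + 1 := by
    simp [hN]
  have hdp1 : ∀ i, i < T.toNat + 1 →
      ((List.replicate (T + 1).toNat (0 : Int)).set 0 1).getD i 0 = if i = 0 then 1 else 0 := by
    intro i hi
    rw [List.getD_eq_getElem?_getD, List.getElem?_set]
    by_cases hi0 : i = 0
    · rw [if_pos (by omega), if_pos (by rw [List.length_replicate]; omega), if_pos hi0]; rfl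
    · rw [if_neg (by omega), List.getElem?_replicate, if_pos (by omega), if_neg hi0]; rfl
  obtain ⟨hL, hV⟩ := outerA coins hc (T.toNat + 1) _ hlen hdp1 (T.toNat + 1) (by omega)
    (le_refl _)
  rw [pvGetA_eq _ T hT, hV T.toNat (by omega), if_pos (by omega)]

theorem zero_case (coins : List Int) (n : Int) :
    coinChangePermutation coins n 0 = 1 ∧ coinChangePermutation_alt coins n 0 = 1 := by
  constructor
  · simp only [coinChangePermutation]
    have h1 : ((0 : Int) + 1).toNat = 1 := by decide
    rw [h1]
    have hr : PySem.List.pyRange 1 ((((List.replicate 1 (0 : Int)).set 0 1).length : Nat) : Int) = [] := by decide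
    rw [hr, List.foldl_nil]
    decide
  · rfl

def pvGoodB (coins : List Int) (memo : PySem.Dict Int Int) : Prop :=
  ∀ k v, memo.get? k = some v → 0 ≤ k ∧ v = pvW coins k.toNat

theorem pvSolveB_succ (coins : List Int) (fuel : Nat) (t : Int) (memo : PySem.Dict Int Int) :
    pvSolveB coins (fuel + 1) t memo =
      if t = 0 then (1, memo)
      else
        match memo.get? t with
        | some v => (v, memo)
        | none =>
          let p := coins.foldl
            (fun (p : Int × PySem.Dict Int Int) c =>
              if c ≤ t then
                let r := pvSolveB coins fuel (t - c) p.2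
                (p.1 + r.1, r.2)
              else p) (0, memo)
          (p.1, p.2.insert t p.1) := rfl

theorem solveB_ok (coins : List Int) (hc : ∀ c ∈ coins, 1 ≤ c) :
    ∀ (fuel : Nat) (t : Int) (memo : PySem.Dict Int Int),
      0 ≤ t → t.toNat < fuel → pvGoodB coins memo →
      (pvSolveB coins fuel t memo).1 = pvW coins t.toNat ∧
      pvGoodB coins (pvSolveB coins fuel t memo).2 := by
  intro fuel
  induction fuel with
  | zero => intro t memo _ hf _; exact absurd hf (by omega)
  | succ f ih =>
    intro t memo h0 hf hmemo
    rw [pvSolveB_succ]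
    by_cases ht : t = 0
    · subst ht
      rw [if_pos rfl]
      exact ⟨rfl, hmemo⟩
    · rw [if_neg ht]
      rcases hm : memo.get? t with _ | v
      · have key : ∀ (cs : List Int), (∀ c ∈ cs, (1 : Int) ≤ c) →
            ∀ (acc : Int) (m : PySem.Dict Int Int), pvGoodB coins m →
            (cs.foldl (fun (p : Int × PySem.Dict Int Int) c =>
                if c ≤ t then
                  let r := pvSolveB coins f (t - c) p.2
                  (p.1 + r.1, r.2)
                else p) (acc, m)).1 =
              acc + (cs.map (fun c =>
                if 1 ≤ c ∧ c ≤ t then pvW coins (t.toNat - c.toNat) else 0)).sum ∧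
            pvGoodB coins (cs.foldl (fun (p : Int × PySem.Dict Int Int) c =>
                if c ≤ t then
                  let r := pvSolveB coins f (t - c) p.2
                  (p.1 + r.1, r.2)
                else p) (acc, m)).2 := by
          intro cs
          induction cs with
          | nil =>
            intro _ acc m hmg
            refine ⟨by simp, hmg⟩
          | cons c cs ihc =>
            intro hcs acc m hmg
            have hc1 : (1 : Int) ≤ c := hcs c (by simp)
            simp only [List.foldl_cons]
            by_cases hct : c ≤ t
            · rw [if_pos hct]
              obtain ⟨hv, hg2⟩ := ih (t - c) m (by omega) (by omega) hmg
              obtain ⟨hv2, hg3⟩ := ihc (fun x hx => hcs x (by simp [hx]))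
                (acc + (pvSolveB coins f (t - c) m).1) _ hg2
              refine ⟨?_, hg3⟩
              rw [hv2, hv, List.map_cons, List.sum_cons, if_pos ⟨hc1, hct⟩,
                show (t - c).toNat = t.toNat - c.toNat by omega]
              ring
            · rw [if_neg hct]
              obtain ⟨hv2, hg3⟩ := ihc (fun x hx => hcs x (by simp [hx])) acc m hmg
              refine ⟨?_, hg3⟩
              rw [hv2, List.map_cons, List.sum_cons, if_neg (by tauto)]
              ring
        obtain ⟨hv, hg⟩ := key coins hc 0 memo hmemo
        refine ⟨?_, ?_⟩
        · simp only []
          rw [hv, zero_add, pvW_succ coins t.toNat (by omega)]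
          apply congrArg List.sum
          apply List.map_congr_left
          intro c _
          rw [Int.toNat_of_nonneg h0]
        · simp only []
          intro k v hkv
          rw [PySem.Dict.get?_insert] at hkv
          by_cases hkt : k = t
          · rw [if_pos hkt] at hkv
            cases hkv
            subst hkt
            refine ⟨h0, ?_⟩
            rw [hv, zero_add, pvW_succ coins k.toNat (by omega)]
            apply congrArg List.sum
            apply List.map_congr_left
            intro c _
            rw [Int.toNat_of_nonneg h0]
          · rw [if_neg hkt] at hkv
            exact hg k v hkv
      · obtain ⟨hk0, hkv⟩ := hmemo t v hm
        exact ⟨hkv, hmemo⟩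

theorem B_eval (coins : List Int) (n T : Int) (hT : 0 ≤ T) (hc : ∀ c ∈ coins, 1 ≤ c) :
    coinChangePermutation_alt coins n T = pvW coins T.toNat := by
  have hempty : pvGoodB coins PySem.Dict.empty := by
    intro k v h
    rw [PySem.Dict.get?_empty] at h
    cases h
  exact (solveB_ok coins hc (T.toNat + 1) T PySem.Dict.empty hT (by omega) hempty).1

-- ===== VERDICT (by name: the statement is the Claim_ definition above) =====
theorem coinChangePermutation_spec : Claim_equal_coinChangePermutation := by
  intro coins n target_amt _ hpre
  unfold Spec_coinChangePermutation
  rcases hpre with ⟨hT, hcase⟩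
  rcases hcase with h0 | hc
  · subst h0
    rw [(zero_case coins n).1, (zero_case coins n).2]
  · rw [A_eval coins n target_amt hT hc, B_eval coins n target_amt hT hc]
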